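-- pv_equiv track=rewrite | github.com/tr1ten/DNA | codingninjas/CommonDigitLongest.py | commonDigitLongestSubsequence
-- ===== SOURCE A (Python) =====
-- from collections import Counter
--
-- def commonDigitLongestSubsequence(arr, n) :
--     def solve(idx):
--         if(idx==n): return Counter()
--         cnt = solve(idx+1)
--         mx = 0
--         if(cnt):
--             for x in str(arr[idx]):
--                 mx = max(mx,cnt[x])
--         for x in str(arr[idx]):
--             cnt[x] =mx+1
--         return cnt
--     return max(solve(0).values())
-- ===== SOURCE B (Python) =====
-- def commonDigitLongestSubsequence(arr, n):
--     best = {d: 0 for d in "-0123456789"}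
--     for idx in range(n - 1, -1, -1):
--         s = str(arr[idx])
--         mx = max(best[c] for c in s)
--         for c in s:
--             best[c] = mx + 1
--     return max(best.values())
-- ===== Notes on version B (the rewrite author's own statement) =====
-- stated objective: simpler
-- what changed: Replaces A's recursion that threads a growing Counter through n nested calls by a single explicit reverse loop over a fixed 11-entry table ('-' and the ten digits), so there is no recursion depth and no dynamic key set.
import Mathlib
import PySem

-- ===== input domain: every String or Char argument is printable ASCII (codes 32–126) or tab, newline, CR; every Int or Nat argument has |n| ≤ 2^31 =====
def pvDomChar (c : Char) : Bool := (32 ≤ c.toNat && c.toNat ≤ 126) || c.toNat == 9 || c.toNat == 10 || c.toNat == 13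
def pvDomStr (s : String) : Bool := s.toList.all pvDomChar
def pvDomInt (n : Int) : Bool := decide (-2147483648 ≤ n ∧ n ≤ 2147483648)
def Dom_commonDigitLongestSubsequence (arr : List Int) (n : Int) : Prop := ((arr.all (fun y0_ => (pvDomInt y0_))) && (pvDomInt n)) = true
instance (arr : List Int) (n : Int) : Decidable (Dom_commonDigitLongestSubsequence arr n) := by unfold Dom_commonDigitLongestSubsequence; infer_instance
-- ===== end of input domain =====

-- B replaces A's recursive Counter-threading with an explicit reverse loop over a
-- fixed table of the 11 possible keys ('-' and the ten digits); objective: simpler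
-- (iterative, no recursion depth, no growing Counter).

-- ===== PORT A =====
-- one step of A's inner `solve`: read mx over the digit chars of arr[idx], then overwrite
def pvStepA (arr : List Int) (cnt : PySem.Dict Char Int) (idx : Int) : PySem.Dict Char Int :=
  let s := PySem.Int.toChars (PySem.List.pyGetD arr idx 0)
  let mx := if cnt.size ≠ 0 then s.foldl (fun mx x => max mx (cnt.getD x 0)) 0 else 0
  s.foldl (fun c x => c.insert x (mx + 1)) cnt

-- A's recursion `solve(idx)`; `fuel` only makes the recursion structurally terminating
-- (fuel = n.toNat suffices for every call chain starting at idx = 0 when 0 ≤ n)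
def pvSolveA (arr : List Int) (n : Int) (fuel : Nat) (idx : Int) : PySem.Dict Char Int :=
  if idx = n then PySem.Dict.empty
  else
    match fuel with
    | 0 => PySem.Dict.empty
    | fuel' + 1 => pvStepA arr (pvSolveA arr n fuel' (idx + 1)) idx

def commonDigitLongestSubsequence (arr : List Int) (n : Int) : Int :=
  (PySem.List.max? (pvSolveA arr n n.toNat 0).values (fun v => v)).getD 0

-- ===== PORT B =====
-- best = {d: 0 for d in "-0123456789"}
def pvInit : PySem.Dict Char Int :=
  ("-0123456789".toList).foldl (fun d c => d.insert c 0) PySem.Dict.empty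

-- loop body of B: mx = max(best[c] for c in str(arr[idx])); then best[c] = mx+1 for those c
def pvStepB (arr : List Int) (best : PySem.Dict Char Int) (idx : Int) : PySem.Dict Char Int :=
  let s := PySem.Int.toChars (PySem.List.pyGetD arr idx 0)
  let mx := (PySem.List.max? (s.map (fun c => best.getD c 0)) (fun v => v)).getD 0
  s.foldl (fun b c => b.insert c (mx + 1)) best

def commonDigitLongestSubsequence_alt (arr : List Int) (n : Int) : Int :=
  let best := (PySem.List.pyRange (n - 1) (-1) (-1)).foldl (pvStepB arr) pvInit
  (PySem.List.max? best.values (fun v => v)).getD 0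

-- ===== PRECONDITION & SPEC =====
-- A raises outside 1 ≤ n ≤ len(arr): ValueError (max of an empty Counter) for n = 0,
-- RecursionError for n < 0, IndexError for n > len(arr).
def Pre_commonDigitLongestSubsequence (arr : List Int) (n : Int) : Prop :=
  1 ≤ n ∧ n ≤ (arr.length : Int)
instance (arr : List Int) (n : Int) : Decidable (Pre_commonDigitLongestSubsequence arr n) := by unfold Pre_commonDigitLongestSubsequence; infer_instance
def pvWitness_commonDigitLongestSubsequence : List Int × Int := ([3, 13], 2)

def Spec_commonDigitLongestSubsequence (arr : List Int) (n : Int) (out : Int) : Prop := out = commonDigitLongestSubsequence_alt arr n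
instance (arr : List Int) (n : Int) (out : Int) : Decidable (Spec_commonDigitLongestSubsequence arr n out) := by unfold Spec_commonDigitLongestSubsequence; infer_instance

-- ===== CLAIM (what is proved, stated in full; the proofs are below) =====
def Claim_equal_commonDigitLongestSubsequence : Prop := ∀ (arr : List Int) (n : Int), Dom_commonDigitLongestSubsequence arr n → Pre_commonDigitLongestSubsequence arr n → Spec_commonDigitLongestSubsequence arr n (commonDigitLongestSubsequence arr n)

-- ===== LEMMAS AND PROOFS =====

-- the state relation between A's Counter `cnt` and B's fixed table `best`
def pvInv (cnt best : PySem.Dict Char Int) : Prop :=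
  best.keys.Nodup ∧
  (∀ c, cnt.getD c 0 = best.getD c 0) ∧
  cnt.keys.Nodup ∧
  (∀ c ∈ cnt.keys, c ∈ best.keys) ∧
  (∀ c ∈ cnt.keys, 1 ≤ cnt.getD c 0) ∧
  (∀ c, c ∉ cnt.keys → cnt.getD c 0 = 0)

lemma pvToDigits_ne_nil (m : Nat) : Nat.toDigits 10 m ≠ [] := by
  have H : ∀ (f n : Nat) (l : List Char), l ≠ [] → Nat.toDigitsCore 10 f n l ≠ [] := by
    intro f
    induction f with
    | zero => intro n l h; simpa [Nat.toDigitsCore] using h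
    | succ f ih =>
      intro n l h
      simp only [Nat.toDigitsCore]
      split
      · simp
      · exact ih _ _ (by simp)
  unfold Nat.toDigits
  simp only [Nat.toDigitsCore]
  split
  · simp
  · exact H _ _ _ (by simp)

lemma pvToChars_ne_nil (v : Int) : PySem.Int.toChars v ≠ [] := by
  unfold PySem.Int.toChars
  split
  · simp
  · exact pvToDigits_ne_nil _

lemma pvGetD_foldl_insert_const (s : List Char) (d : PySem.Dict Char Int) (w : Int) (c : Char) :
    (s.foldl (fun d x => d.insert x w) d).getD c 0 = if c ∈ s then w else d.getD c 0 := by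
  induction s generalizing d with
  | nil => simp
  | cons x t ih =>
    simp only [List.foldl_cons, ih, PySem.Dict.getD_insert, List.mem_cons]
    by_cases hct : c ∈ t <;> by_cases hcx : c = x <;> simp [hct, hcx]

lemma pvKeys_nil_of_size_zero (d : PySem.Dict Char Int) (h : d.size = 0) : d.keys = [] := by
  simp only [PySem.Dict.size, PySem.Dict.keys] at *
  simp [List.length_eq_zero_iff.mp h]

-- B's loop list [n-1, …, 0]
lemma pvRange_eq (n : Int) (hn : 0 ≤ n) :
    PySem.List.pyRange (n-1) (-1) (-1) = (List.range n.toNat).map (fun j : Nat => n - 1 - (j:Int)) := by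
  unfold PySem.List.pyRange
  rw [if_neg (by norm_num : ¬(-1:Int) = 0)]
  have hfun : (fun k : Nat => n - 1 + -1 * (k:Int)) = fun j : Nat => n - 1 - (j:Int) := by
    funext k; ring
  rw [if_neg (by norm_num : ¬(0:Int) < -1)]
  have hc : (if (-1:Int) < n - 1 then ((n - 1 - -1 + - -1 - 1) / - -1).toNat else 0) = n.toNat := by
    split_ifs with h
    · have he : (n - 1 - -1 + - -1 - 1) / - -1 = n := by norm_num
      rw [he]
    · omega
  rw [hc, hfun]

-- the two step functions preserve the relation
lemma pvStep_inv (arr : List Int) (idx : Int) (cnt best : PySem.Dict Char Int)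
    (h : pvInv cnt best) : pvInv (pvStepA arr cnt idx) (pvStepB arr best idx) := by
  obtain ⟨hbn, hag, hcn, hsub, hge1, hz⟩ := h
  simp only [pvStepA, pvStepB]
  set s := PySem.Int.toChars (PySem.List.pyGetD arr idx 0) with hsdef
  have hnn : ∀ c, (0:Int) ≤ cnt.getD c 0 := by
    intro c; by_cases hc : c ∈ cnt.keys
    · have := hge1 c hc; omega
    · rw [hz c hc]
  have hmap : s.map (fun c => best.getD c 0) = s.map (fun c => cnt.getD c 0) :=
    List.map_congr_left (fun c _ => (hag c).symm)
  have hsne : s ≠ [] := pvToChars_ne_nil _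
  obtain ⟨c0, rest, hcons⟩ := List.exists_cons_of_ne_nil hsne
  have hmx : (if cnt.size ≠ 0 then s.foldl (fun mx x => max mx (cnt.getD x 0)) 0 else 0)
      = (PySem.List.max? (s.map (fun c => best.getD c 0)) (fun v => v)).getD 0 := by
    rw [hmap, hcons]
    simp only [List.map_cons, PySem.List.max?_id_cons, Option.getD_some]
    by_cases hsz : cnt.size = 0
    · have hk0 : cnt.keys = [] := pvKeys_nil_of_size_zero cnt hsz
      have hzz : ∀ c, cnt.getD c 0 = 0 := fun c => hz c (by simp [hk0])
      rw [if_neg (by simpa using hsz), hzz c0]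
      rcases PySem.List.foldl_max_mem (rest.map (fun c => cnt.getD c 0)) 0 with hm | hm
      · rw [hm]
      · obtain ⟨x, _, hfx⟩ := List.mem_map.mp hm
        rw [← hfx, hzz x]
    · rw [if_pos hsz]
      simp only [List.foldl_cons]
      rw [max_eq_right (hnn c0), List.foldl_map]
  have h0mx : (0:Int) ≤ (PySem.List.max? (s.map (fun c => best.getD c 0)) (fun v => v)).getD 0 := by
    rw [← hmx]
    split_ifs with _
    · exact (PySem.List.le_foldl_max_int s (fun x => cnt.getD x 0) 0).1
    · exact le_refl 0
  rw [hmx]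
  set W : Int := (PySem.List.max? (s.map (fun c => best.getD c 0)) (fun v => v)).getD 0 + 1 with hW
  have hKA : (s.foldl (fun c x => c.insert x W) cnt).keys = PySem.Set.update cnt.keys s :=
    PySem.Dict.keys_foldl_insert s (fun _ _ => W) cnt
  have hKB : (s.foldl (fun b c => b.insert c W) best).keys = PySem.Set.update best.keys s :=
    PySem.Dict.keys_foldl_insert s (fun _ _ => W) best
  have hNA : (s.foldl (fun c x => c.insert x W) cnt).keys.Nodup :=
    PySem.Dict.nodup_keys_foldl_insert s (fun _ _ => W) cnt hcn
  have hNB : (s.foldl (fun b c => b.insert c W) best).keys.Nodup :=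
    PySem.Dict.nodup_keys_foldl_insert s (fun _ _ => W) best hbn
  have hGA : ∀ c, (s.foldl (fun c x => c.insert x W) cnt).getD c 0
      = if c ∈ s then W else cnt.getD c 0 := fun c => pvGetD_foldl_insert_const s cnt W c
  have hGB : ∀ c, (s.foldl (fun b c => b.insert c W) best).getD c 0
      = if c ∈ s then W else best.getD c 0 := fun c => pvGetD_foldl_insert_const s best W c
  refine ⟨hNB, ?_, hNA, ?_, ?_, ?_⟩
  · intro c
    rw [hGA c, hGB c]
    by_cases hcs : c ∈ s <;> simp [hcs, hag c]
  · intro c hc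
    rw [hKA] at hc
    rw [hKB, PySem.Set.mem_update]
    rcases (PySem.Set.mem_update _ _ _).mp hc with hh | hh
    · exact Or.inl (hsub c hh)
    · exact Or.inr hh
  · intro c hc
    rw [hKA] at hc
    rw [hGA c]
    by_cases hcs : c ∈ s
    · rw [if_pos hcs]; omega
    · rw [if_neg hcs]
      rcases (PySem.Set.mem_update _ _ _).mp hc with hh | hh
      · exact hge1 c hh
      · exact absurd hh hcs
  · intro c hc
    rw [hKA, PySem.Set.mem_update] at hc
    rw [not_or] at hc
    rw [hGA c, if_neg hc.2]
    exact hz c hc.1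

lemma pvStep_keys_ne_nil (arr : List Int) (idx : Int) (cnt : PySem.Dict Char Int) :
    (pvStepA arr cnt idx).keys ≠ [] := by
  simp only [pvStepA]
  set s := PySem.Int.toChars (PySem.List.pyGetD arr idx 0) with hsdef
  set W : Int := (if cnt.size ≠ 0 then s.foldl (fun mx x => max mx (cnt.getD x 0)) 0 else 0) + 1
  have hKA : (s.foldl (fun c x => c.insert x W) cnt).keys = PySem.Set.update cnt.keys s :=
    PySem.Dict.keys_foldl_insert s (fun _ _ => W) cnt
  obtain ⟨c0, rest, hcons⟩ := List.exists_cons_of_ne_nil (pvToChars_ne_nil (PySem.List.pyGetD arr idx 0))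
  intro hnil
  have : c0 ∈ (s.foldl (fun c x => c.insert x W) cnt).keys := by
    rw [hKA, PySem.Set.mem_update]
    exact Or.inr (by rw [hsdef, hcons]; exact List.mem_cons_self)
  rw [hnil] at this
  exact absurd this (List.not_mem_nil)

lemma pvInit_getD (c : Char) : pvInit.getD c 0 = 0 := by
  unfold pvInit
  rw [pvGetD_foldl_insert_const]
  split_ifs <;> simp [PySem.Dict.getD_empty]

lemma pvInit_nodup : pvInit.keys.Nodup :=
  PySem.Dict.nodup_keys_foldl_insert _ (fun _ _ => (0:Int)) PySem.Dict.empty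
    (by simp [PySem.Dict.keys_empty])

lemma pvInv_init : pvInv PySem.Dict.empty pvInit := by
  refine ⟨pvInit_nodup, ?_, by simp [PySem.Dict.keys_empty], ?_, ?_, ?_⟩
  · intro c
    rw [pvInit_getD c]
    simp [PySem.Dict.getD_empty]
  · intro c hc; simp [PySem.Dict.keys_empty] at hc
  · intro c hc; simp [PySem.Dict.keys_empty] at hc
  · intro c _; simp [PySem.Dict.getD_empty]

-- main induction: after k steps both sides are related
lemma pvMain (arr : List Int) (n : Int) (k : Nat) : (k : Int) ≤ n →
    pvInv (pvSolveA arr n k (n - k))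
      (((List.range k).map (fun j : Nat => n - 1 - (j:Int))).foldl (pvStepB arr) pvInit) ∧
    (k ≠ 0 → (pvSolveA arr n k (n - k)).keys ≠ []) := by
  induction k with
  | zero =>
    intro _
    have hA : pvSolveA arr n 0 (n - (0:Nat)) = PySem.Dict.empty := by
      unfold pvSolveA
      rw [if_pos (by push_cast; ring)]
    rw [hA]
    simp only [List.range_zero, List.map_nil, List.foldl_nil]
    exact ⟨pvInv_init, fun h => absurd rfl h⟩
  | succ k ih =>
    intro hk
    have hk' : (k : Int) ≤ n := by push_cast at hk; omega
    obtain ⟨ihv, _⟩ := ih hk'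
    have hidx : n - ((k+1 : Nat) : Int) = n - 1 - (k : Int) := by push_cast; ring
    have hA : pvSolveA arr n (k+1) (n - ((k+1 : Nat) : Int))
        = pvStepA arr (pvSolveA arr n k (n - (k : Int))) (n - ((k+1 : Nat) : Int)) := by
      rw [pvSolveA]
      rw [if_neg (by push_cast; omega)]
      have harg : n - ((k+1 : Nat) : Int) + 1 = n - (k : Int) := by push_cast; ring
      rw [harg]
    have hL : ((List.range (k+1)).map (fun j : Nat => n - 1 - (j:Int))).foldl (pvStepB arr) pvInit
        = pvStepB arr (((List.range k).map (fun j : Nat => n - 1 - (j:Int))).foldl (pvStepB arr) pvInit)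
            (n - 1 - (k : Int)) := by
      rw [List.range_succ, List.map_append, List.foldl_append]
      simp only [List.map_cons, List.map_nil, List.foldl_cons, List.foldl_nil]
    rw [hA, hL, hidx]
    exact ⟨pvStep_inv arr _ _ _ ihv, fun _ => pvStep_keys_ne_nil arr _ _⟩

-- related nonempty states have the same maximum value
lemma pvFinal (cnt best : PySem.Dict Char Int) (h : pvInv cnt best) (hne : cnt.keys ≠ []) :
    (PySem.List.max? cnt.values (fun v => v)).getD 0
      = (PySem.List.max? best.values (fun v => v)).getD 0 := by
  obtain ⟨hbn, hag, hcn, hsub, hge1, hz⟩ := h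
  have hvc : cnt.values = cnt.keys.map (fun k => cnt.getD k 0) :=
    PySem.Dict.values_eq_map_keys cnt hcn 0
  have hvb : best.values = best.keys.map (fun k => best.getD k 0) :=
    PySem.Dict.values_eq_map_keys best hbn 0
  obtain ⟨k0, t0, hked⟩ := List.exists_cons_of_ne_nil hne
  have hk0 : k0 ∈ cnt.keys := by rw [hked]; exact List.mem_cons_self
  have hvcne : cnt.values ≠ [] := by
    rw [hvc, hked]; simp
  have hvbne : best.values ≠ [] := by
    rw [hvb]
    have : k0 ∈ best.keys := hsub k0 hk0
    intro hb
    rw [List.map_eq_nil_iff] at hb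
    rw [hb] at this
    exact absurd this (List.not_mem_nil)
  rcases hMA : PySem.List.max? cnt.values (fun v => v) with _ | mA
  · exact absurd ((PySem.List.max?_eq_none_iff _ _).mp hMA) hvcne
  rcases hMB : PySem.List.max? best.values (fun v => v) with _ | mB
  · exact absurd ((PySem.List.max?_eq_none_iff _ _).mp hMB) hvbne
  simp only [Option.getD_some]
  have hmemB : ∀ c ∈ cnt.keys, best.getD c 0 ∈ best.values := by
    intro c hc
    rw [hvb]
    exact List.mem_map_of_mem (hsub c hc)
  have h1 : mA ≤ mB := by
    have hmem := PySem.List.max?_mem hMA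
    rw [hvc] at hmem
    obtain ⟨kk, hkk, hkv⟩ := List.mem_map.mp hmem
    have : mA = best.getD kk 0 := by rw [← hkv, hag kk]
    rw [this]
    exact PySem.List.max?_isMax hMB _ (hmemB kk hkk)
  have h0A : (1:Int) ≤ mA := by
    have : cnt.getD k0 0 ∈ cnt.values := by
      rw [hvc]; exact List.mem_map_of_mem hk0
    have hle := PySem.List.max?_isMax hMA _ this
    have := hge1 k0 hk0
    omega
  have h2 : mB ≤ mA := by
    have hmem := PySem.List.max?_mem hMB
    rw [hvb] at hmem
    obtain ⟨kk, hkk, hkv⟩ := List.mem_map.mp hmem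
    by_cases hck : kk ∈ cnt.keys
    · have : cnt.getD kk 0 ∈ cnt.values := by
        rw [hvc]; exact List.mem_map_of_mem hck
      have hle := PySem.List.max?_isMax hMA _ this
      have heq : mB = cnt.getD kk 0 := by rw [← hkv, ← hag kk]
      omega
    · have heq : mB = 0 := by rw [← hkv, ← hag kk, hz kk hck]
      omega
  omega

-- ===== VERDICT (by name: the statement is the Claim_ definition above) =====
theorem commonDigitLongestSubsequence_spec : Claim_equal_commonDigitLongestSubsequence := by
  intro arr n _ hpre
  obtain ⟨h1, _⟩ := hpre
  have hn : 0 ≤ n := by omega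
  have hk : ((n.toNat : Int)) ≤ n := by omega
  have hmain := pvMain arr n n.toNat hk
  have hzero : n - (n.toNat : Int) = 0 := by omega
  rw [hzero] at hmain
  unfold Spec_commonDigitLongestSubsequence commonDigitLongestSubsequence commonDigitLongestSubsequence_alt
  rw [pvRange_eq n hn]
  exact pvFinal _ _ hmain.1 (hmain.2 (by omega))
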